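-- pv_equiv track=rewrite | github.com/lordminx/autoblog | pixelsort.py | average_pixels
-- ===== SOURCE A (Python) =====
-- def average_pixels(chunk):
--     """Average the pixel values of a list of pixels."""
--
--     red = [pix[0] for pix in chunk]
--     green = [pix[1] for pix in chunk]
--     blue = [pix[2] for pix in chunk]
--
--     red = sum(red) // len(red)
--     green = sum(green) // len(green)
--     blue = sum(blue) // len(blue)
--
--     return [(red, green, blue)] * len(chunk)
-- ===== SOURCE B (Python) =====
-- def average_pixels(chunk):
--     """Average the pixel values of a list of pixels (divide-and-conquer sums)."""
--
--     def sums(pixels):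
--         if len(pixels) == 0:
--             return (0, 0, 0)
--         if len(pixels) == 1:
--             p = pixels[0]
--             return (p[0], p[1], p[2])
--         mid = len(pixels) // 2
--         l = sums(pixels[:mid])
--         r = sums(pixels[mid:])
--         return (l[0] + r[0], l[1] + r[1], l[2] + r[2])
--
--     n = len(chunk)
--     r, g, b = sums(chunk)
--     return [(r // n, g // n, b // n)] * n
-- ===== Notes on version B (the rewrite author's own statement) =====
-- stated objective: alternative
-- what changed: Replaces the three comprehensions and three linear sum() passes with a recursive divide-and-conquer that splits the list in half, computes componentwise (r,g,b) sums of each half and merges them, then divides once; correct because integer sum is associative so any split order yields the same totals.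
import Mathlib
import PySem

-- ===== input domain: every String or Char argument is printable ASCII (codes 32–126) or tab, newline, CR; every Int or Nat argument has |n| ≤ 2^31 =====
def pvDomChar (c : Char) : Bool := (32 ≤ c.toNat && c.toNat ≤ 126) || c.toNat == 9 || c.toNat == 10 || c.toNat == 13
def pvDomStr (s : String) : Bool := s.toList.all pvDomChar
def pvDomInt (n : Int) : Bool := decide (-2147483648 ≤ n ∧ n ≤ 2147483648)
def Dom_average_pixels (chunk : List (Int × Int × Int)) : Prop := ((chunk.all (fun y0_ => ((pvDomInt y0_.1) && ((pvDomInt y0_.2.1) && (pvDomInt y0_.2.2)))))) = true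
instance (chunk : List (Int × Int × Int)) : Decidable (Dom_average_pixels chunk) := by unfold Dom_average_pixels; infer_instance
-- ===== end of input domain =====

-- B computes the componentwise RGB sums by recursive divide-and-conquer halving instead of A's three comprehensions + three sum passes; Pre_ excludes the empty list, where A raises ZeroDivisionError.


-- ===== PORT A =====
-- three comprehensions, three sums, then floor division by each list's length
def average_pixels (chunk : List (Int × Int × Int)) : List (Int × Int × Int) :=
  let red := chunk.map (fun pix => pix.1)
  let green := chunk.map (fun pix => pix.2.1)
  let blue := chunk.map (fun pix => pix.2.2)
  let red' := PySem.Int.floordiv red.sum (red.length : Int)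
  let green' := PySem.Int.floordiv green.sum (green.length : Int)
  let blue' := PySem.Int.floordiv blue.sum (blue.length : Int)
  List.replicate chunk.length (red', green', blue')

-- ===== PORT B =====
-- divide-and-conquer componentwise sums: split at mid = len // 2, sum each half, merge.
-- The Python slices pixels[:mid] / pixels[mid:] with 0 ≤ mid ≤ len are exactly take mid / drop mid.
def pvSums : List (Int × Int × Int) → Int × Int × Int
  | [] => (0, 0, 0)
  | [p] => (p.1, p.2.1, p.2.2)
  | p :: q :: rest =>
    ((pvSums ((p :: q :: rest).take ((p :: q :: rest).length / 2))).1
       + (pvSums ((p :: q :: rest).drop ((p :: q :: rest).length / 2))).1,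
     (pvSums ((p :: q :: rest).take ((p :: q :: rest).length / 2))).2.1
       + (pvSums ((p :: q :: rest).drop ((p :: q :: rest).length / 2))).2.1,
     (pvSums ((p :: q :: rest).take ((p :: q :: rest).length / 2))).2.2
       + (pvSums ((p :: q :: rest).drop ((p :: q :: rest).length / 2))).2.2)
termination_by pixels => pixels.length
decreasing_by
  · simp; omega
  · simp; omega

def average_pixels_alt (chunk : List (Int × Int × Int)) : List (Int × Int × Int) :=
  let n : Int := chunk.length
  let s := pvSums chunk
  List.replicate chunk.length
    (PySem.Int.floordiv s.1 n, PySem.Int.floordiv s.2.1 n, PySem.Int.floordiv s.2.2 n)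

-- ===== PRECONDITION & SPEC =====
-- Pre_ excludes the empty list, on which A raises ZeroDivisionError.
def Pre_average_pixels (chunk : List (Int × Int × Int)) : Prop := chunk ≠ []
instance (chunk : List (Int × Int × Int)) : Decidable (Pre_average_pixels chunk) := by unfold Pre_average_pixels; infer_instance
def pvWitness_average_pixels : (List (Int × Int × Int)) := [(1, 2, 3), (4, 5, 7)]
def Spec_average_pixels (chunk : List (Int × Int × Int)) (out : List (Int × Int × Int)) : Prop := out = average_pixels_alt chunk
instance (chunk : List (Int × Int × Int)) (out : List (Int × Int × Int)) : Decidable (Spec_average_pixels chunk out) := by unfold Spec_average_pixels; infer_instance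

-- ===== CLAIM (what is proved, stated in full; the proofs are below) =====
def Claim_equal_average_pixels : Prop := ∀ (chunk : List (Int × Int × Int)), Dom_average_pixels chunk → Pre_average_pixels chunk → Spec_average_pixels chunk (average_pixels chunk)

-- ===== LEMMAS AND PROOFS =====

-- B's divide-and-conquer sums equal the three componentwise map-sums.
theorem pvSums_eq (pixels : List (Int × Int × Int)) :
    pvSums pixels = ((pixels.map (fun pix => pix.1)).sum,
                     (pixels.map (fun pix => pix.2.1)).sum,
                     (pixels.map (fun pix => pix.2.2)).sum) := by
  fun_induction pvSums pixels with
  | case1 => simp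
  | case2 p => simp
  | case3 p q rest ih1 ih2 =>
    simp only [ih1, ih2]
    have h := List.take_append_drop ((p :: q :: rest).length / 2) (p :: q :: rest)
    conv_rhs => rw [← h]
    simp [← List.sum_append]

-- ===== VERDICT (by name: the statement is the Claim_ definition above) =====
theorem average_pixels_spec : Claim_equal_average_pixels := by
  intro chunk _ _
  unfold Spec_average_pixels average_pixels average_pixels_alt
  simp [pvSums_eq]
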